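-- pv_equiv track=rewrite | github.com/kungfuai/CVlization | datasets/omr/openscore/page_musicxml.py | _largest_consecutive_cluster
-- ===== SOURCE A (Python) =====
-- def _largest_consecutive_cluster(nums: list[int]) -> list[int]:
--     """
--     Return the largest run of consecutive integers in a sorted list.
--     Gaps of ≤ 1 are treated as consecutive (allows a single missing bar number).
--     When two clusters tie in length, the LATER (larger) one is preferred,
--     since bar numbers grow through the score and contaminating values
--     (page numbers, multimeasure-rest counts) are typically small.
--     """
--     best, current = [nums[0]], [nums[0]]
--     for v in nums[1:]:
--         if v - current[-1] <= 1:
--             current.append(v)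
--         else:
--             if len(current) >= len(best):  # >= to prefer later cluster on tie
--                 best = current
--             current = [v]
--     if len(current) >= len(best):
--         best = current
--     return best
-- ===== SOURCE B (Python) =====
-- def _largest_consecutive_cluster(nums: list[int]) -> list[int]:
--     if not nums:
--         return []
--     # pass 1: materialize every maximal run by scanning adjacent pairs for breaks
--     runs = [[nums[0]]]
--     for p, v in zip(nums, nums[1:]):
--         if v - p > 1:
--             runs.append([v])
--         else:
--             runs[-1].append(v)
--     # pass 2: pick the longest run; >= prefers the later run on ties
--     best = []
--     for r in runs:
--         if len(r) >= len(best):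
--             best = r
--     return best
-- ===== Notes on version B (the rewrite author's own statement) =====
-- stated objective: alternative
-- what changed: B materializes the full list of maximal runs in a first pass that scans adjacent pairs (via zip of the list with its tail) for breaks, then selects the longest run in a separate >=-pass, instead of A's single loop threading a best/current accumulator pair.
import Mathlib
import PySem

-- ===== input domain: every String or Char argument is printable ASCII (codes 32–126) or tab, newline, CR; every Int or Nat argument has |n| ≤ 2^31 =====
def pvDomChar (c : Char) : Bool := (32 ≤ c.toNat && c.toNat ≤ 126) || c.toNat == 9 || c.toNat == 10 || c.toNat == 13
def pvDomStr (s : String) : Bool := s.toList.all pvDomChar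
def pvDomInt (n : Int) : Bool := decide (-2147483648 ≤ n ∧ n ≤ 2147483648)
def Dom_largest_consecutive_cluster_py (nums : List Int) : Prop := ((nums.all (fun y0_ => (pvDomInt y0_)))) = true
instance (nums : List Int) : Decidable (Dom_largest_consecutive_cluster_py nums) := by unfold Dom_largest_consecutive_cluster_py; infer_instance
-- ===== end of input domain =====

-- B splits the input into its list of maximal runs (scanning adjacent pairs for breaks)
-- and then picks the longest run in a separate pass (>= prefers the later run on a tie),
-- instead of A's single loop threading a best/current accumulator pair.

-- ===== PORT A =====
-- loop body of A's for-loop (best, current are the two accumulator lists)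
def pvStepA (st : List Int × List Int) (v : Int) : List Int × List Int :=
  if v - PySem.List.pyGetD st.2 (-1) 0 ≤ 1 then        -- v - current[-1] <= 1 (current is never empty)
    (st.1, st.2 ++ [v])                                 -- current.append(v)
  else if st.1.length ≤ st.2.length then                -- len(current) >= len(best)
    (st.2, [v])
  else
    (st.1, [v])

def largest_consecutive_cluster_py (nums : List Int) : List Int :=
  match nums with
  | [] => []                                            -- nums[0] raises IndexError; excluded by Pre_
  | n0 :: rest =>
    let st := rest.foldl pvStepA ([n0], [n0])           -- for v in nums[1:]
    if st.1.length ≤ st.2.length then st.2 else st.1    -- final len(current) >= len(best) check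

-- ===== PORT B =====
-- pass-1 loop body: extend the last run or start a new one at a break
def pvStepB1 (runs : List (List Int)) (pv : Int × Int) : List (List Int) :=
  if pv.2 - pv.1 > 1 then runs ++ [[pv.2]]
  else runs.dropLast ++ [runs.getLastD [] ++ [pv.2]]    -- runs[-1].append(v)

-- pass-2 loop body: keep the longest run, >= prefers the later one
def pvStepB2 (best : List Int) (r : List Int) : List Int :=
  if best.length ≤ r.length then r else best            -- len(r) >= len(best)

def largest_consecutive_cluster_py_alt (nums : List Int) : List Int :=
  match nums with
  | [] => []
  | n0 :: rest =>
    let runs := ((n0 :: rest).zip rest).foldl pvStepB1 [[n0]]   -- for p, v in zip(nums, nums[1:])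
    runs.foldl pvStepB2 []                                      -- for r in runs

-- ===== PRECONDITION & SPEC =====
-- Python A indexes the first element up front, so it raises IndexError on the empty list.
def Pre_largest_consecutive_cluster_py (nums : List Int) : Prop := nums ≠ []
instance (nums : List Int) : Decidable (Pre_largest_consecutive_cluster_py nums) := by unfold Pre_largest_consecutive_cluster_py; infer_instance
def pvWitness_largest_consecutive_cluster_py : List Int := [1, 2, 5]

def Spec_largest_consecutive_cluster_py (nums : List Int) (out : List Int) : Prop := out = largest_consecutive_cluster_py_alt nums
instance (nums : List Int) (out : List Int) : Decidable (Spec_largest_consecutive_cluster_py nums out) := by unfold Spec_largest_consecutive_cluster_py; infer_instance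

-- ===== CLAIM (what is proved, stated in full; the proofs are below) =====
def Claim_equal_largest_consecutive_cluster_py : Prop := ∀ (nums : List Int), Dom_largest_consecutive_cluster_py nums → Pre_largest_consecutive_cluster_py nums → Spec_largest_consecutive_cluster_py nums (largest_consecutive_cluster_py nums)

-- ===== LEMMAS AND PROOFS =====

-- (run after x, rest): splits off the maximal run continuing an element x
def pvTakeRun (x : Int) : List Int → List Int × List Int
  | [] => ([], [])
  | v :: t => if v - x ≤ 1 then (v :: (pvTakeRun v t).1, (pvTakeRun v t).2) else ([], v :: t)

theorem pvTakeRun_rest_le : ∀ (l : List Int) (x : Int), (pvTakeRun x l).2.length ≤ l.length := by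
  intro l
  induction l with
  | nil => intro x; simp [pvTakeRun]
  | cons v t ih =>
    intro x
    simp only [pvTakeRun]
    split
    · exact Nat.le_trans (ih v) (Nat.le_succ _)
    · simp

-- the list of maximal runs of nums
def pvRunsList : List Int → List (List Int)
  | [] => []
  | x :: l => (x :: (pvTakeRun x l).1) :: pvRunsList (pvTakeRun x l).2
termination_by l => l.length
decreasing_by
  exact Nat.lt_succ_of_le (pvTakeRun_rest_le l x)

def pvSelect (b : List Int) (rs : List (List Int)) : List Int := rs.foldl pvStepB2 b

theorem pvStepA_ext (best cur : List Int) (x v : Int)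
    (h : PySem.List.pyGetD cur (-1) 0 = x) :
    pvStepA (best, cur) v =
      if v - x ≤ 1 then (best, cur ++ [v])
      else if best.length ≤ cur.length then (cur, [v]) else (best, [v]) := by
  simp only [pvStepA, h]

theorem pvLoopA : ∀ (l : List Int) (best cur : List Int) (x : Int), cur.getLast? = some x →
    (if (l.foldl pvStepA (best, cur)).1.length ≤ (l.foldl pvStepA (best, cur)).2.length
     then (l.foldl pvStepA (best, cur)).2 else (l.foldl pvStepA (best, cur)).1)
    = pvSelect best ((cur ++ (pvTakeRun x l).1) :: pvRunsList (pvTakeRun x l).2) := by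
  intro l
  induction l with
  | nil =>
    intro best cur x _
    simp [pvTakeRun, pvRunsList, pvSelect, pvStepB2]
  | cons v t ih =>
    intro best cur x hlast
    have hne : cur ≠ [] := by
      intro h; subst h; simp at hlast
    have hgd : PySem.List.pyGetD cur (-1) 0 = x := by
      rw [PySem.List.pyGetD_neg_one cur 0 hne]
      exact Option.some.inj ((List.getLast?_eq_some_getLast hne).symm.trans hlast)
    simp only [List.foldl_cons, pvStepA_ext best cur x v hgd]
    by_cases hc : v - x ≤ 1
    · simp only [if_pos hc]
      have h2 : (cur ++ [v]).getLast? = some v := by simp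
      rw [ih best (cur ++ [v]) v h2]
      simp only [pvTakeRun, if_pos hc]
      simp [List.append_assoc]
    · simp only [if_neg hc]
      simp only [pvTakeRun, if_neg hc]
      by_cases hb : best.length ≤ cur.length
      · simp only [if_pos hb]
        rw [ih cur [v] v (by simp)]
        simp only [pvSelect, pvRunsList, List.foldl_cons, pvStepB2]
        simp [hb]
      · simp only [if_neg hb]
        rw [ih best [v] v (by simp)]
        simp only [pvSelect, pvRunsList, List.foldl_cons, pvStepB2]
        simp [hb]

theorem pvLoopB1 : ∀ (l : List Int) (x : Int) (acc : List (List Int)) (cur : List Int),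
    ((x :: l).zip l).foldl pvStepB1 (acc ++ [cur])
    = acc ++ (cur ++ (pvTakeRun x l).1) :: pvRunsList (pvTakeRun x l).2 := by
  intro l
  induction l with
  | nil => intro x acc cur; simp [pvTakeRun, pvRunsList]
  | cons v t ih =>
    intro x acc cur
    simp only [List.zip_cons_cons, List.foldl_cons, pvStepB1]
    by_cases hc : v - x > 1
    · rw [if_pos hc]
      have : acc ++ [cur] ++ [[v]] = (acc ++ [cur]) ++ [[v]] := by simp
      rw [this, ih v (acc ++ [cur]) [v]]
      have hnc : ¬ (v - x ≤ 1) := by omega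
      simp only [pvTakeRun, if_neg hnc, pvRunsList]
      simp
    · rw [if_neg hc]
      have hdl : (acc ++ [cur]).dropLast = acc := by simp
      have hgl : (acc ++ [cur]).getLastD [] = cur := by simp
      rw [hdl, hgl, ih v acc (cur ++ [v])]
      have hcc : v - x ≤ 1 := by omega
      simp only [pvTakeRun, if_pos hcc]
      simp [List.append_assoc]

theorem pvSelect_head (r : List Int) (rs : List (List Int)) (b : List Int) (hb : b.length ≤ r.length) :
    pvSelect b (r :: rs) = pvSelect r rs := by
  simp [pvSelect, pvStepB2, hb]

theorem pvA_eq (nums : List Int) :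
    largest_consecutive_cluster_py nums = pvSelect [] (pvRunsList nums) := by
  match nums with
  | [] => simp [largest_consecutive_cluster_py, pvRunsList, pvSelect]
  | x :: l =>
    show (if (l.foldl pvStepA ([x], [x])).1.length ≤ (l.foldl pvStepA ([x], [x])).2.length
          then (l.foldl pvStepA ([x], [x])).2 else (l.foldl pvStepA ([x], [x])).1)
         = pvSelect [] (pvRunsList (x :: l))
    rw [pvLoopA l [x] [x] x (by simp)]
    simp only [pvRunsList]
    rw [pvSelect_head _ _ [x] (by simp), pvSelect_head _ _ [] (by simp)]
    rfl

theorem pvB_eq (nums : List Int) :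
    largest_consecutive_cluster_py_alt nums = pvSelect [] (pvRunsList nums) := by
  match nums with
  | [] => simp [largest_consecutive_cluster_py_alt, pvRunsList, pvSelect]
  | x :: l =>
    simp only [largest_consecutive_cluster_py_alt]
    have h0 : ([[x]] : List (List Int)) = [] ++ [[x]] := by simp
    rw [h0, pvLoopB1 l x [] [x]]
    simp only [pvRunsList, List.nil_append]
    rfl

-- ===== VERDICT (by name: the statement is the Claim_ definition above) =====
theorem largest_consecutive_cluster_py_spec : Claim_equal_largest_consecutive_cluster_py := by
  intro nums _ _
  unfold Spec_largest_consecutive_cluster_py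
  rw [pvA_eq, pvB_eq]
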